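-- pv_equiv track=rewrite | github.com/abe-101/podcast | podcast/shows/rambam-3.py | number_to_hebrew
-- ===== SOURCE A (Python) =====
-- def number_to_hebrew(num):
--     if num <= 0 or num > 200:
--         raise ValueError("Number out of supported range")
--
--     if num == 15:
--         return "טו"
--     if num == 16:
--         return "טז"
--
--     hebrew_numerals = {
--         1: "א",
--         2: "ב",
--         3: "ג",
--         4: "ד",
--         5: "ה",
--         6: "ו",
--         7: "ז",
--         8: "ח",
--         9: "ט",
--         10: "י",
--         20: "כ",
--         30: "ל",
--         40: "מ",
--         50: "נ",
--         60: "ס",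
--         70: "ע",
--         80: "פ",
--         90: "צ",
--         100: "ק",
--         200: "ר",
--     }
--
--     result = []
--     for value, letter in sorted(hebrew_numerals.items(), key=lambda x: x[0], reverse=True):
--         while num >= value:
--             result.append(letter)
--             num -= value
--
--     return "".join(result)
-- ===== SOURCE B (Python) =====
-- def number_to_hebrew(num):
--     if num <= 0 or num > 200:
--         raise ValueError("Number out of supported range")
--
--     if num == 15:
--         return "טו"
--     if num == 16:
--         return "טז"
--
--     hundreds = {1: "ק", 2: "ר"}
--     tens = {1: "י", 2: "כ", 3: "ל", 4: "מ", 5: "נ", 6: "ס", 7: "ע", 8: "פ", 9: "צ"}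
--     units = {1: "א", 2: "ב", 3: "ג", 4: "ד", 5: "ה", 6: "ו", 7: "ז", 8: "ח", 9: "ט"}
--
--     h = num // 100
--     t = (num % 100) // 10
--     u = num % 10
--     return hundreds.get(h, "") + tens.get(t, "") + units.get(u, "")
-- ===== Notes on version B (the rewrite author's own statement) =====
-- stated objective: simpler
-- what changed: Replaces the greedy largest-first subtraction loop over a sorted 20-entry map with direct positional digit arithmetic (num//100, (num%100)//10, num%10) and three small digit maps.
import Mathlib
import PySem

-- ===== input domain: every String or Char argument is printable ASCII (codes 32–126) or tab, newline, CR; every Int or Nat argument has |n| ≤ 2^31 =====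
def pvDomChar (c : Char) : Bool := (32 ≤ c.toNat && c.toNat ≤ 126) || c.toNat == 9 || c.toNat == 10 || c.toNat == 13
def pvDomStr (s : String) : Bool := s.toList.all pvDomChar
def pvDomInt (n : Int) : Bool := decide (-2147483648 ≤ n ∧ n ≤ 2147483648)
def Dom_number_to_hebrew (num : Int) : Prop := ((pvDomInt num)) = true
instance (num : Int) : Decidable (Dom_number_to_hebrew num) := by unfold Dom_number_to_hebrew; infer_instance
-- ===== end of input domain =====

-- B replaces A's greedy largest-first subtraction loop with direct positional digit arithmetic (simpler decomposition, same values).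


-- ===== PORT A =====
-- the inner 'while num >= value: result.append(letter); num -= value' loop,
-- written with a fuel counter as a totality guard: fuel = num.toNat bounds the
-- iteration count whenever value ≥ 1 (true for every value in the dict), so the
-- loop always exits via the 'value ≤ num' test exactly as Python's while does
def numHebWhileF : Nat → Int → Int → String → List String → Int × List String
  | 0, num, _, _, result => (num, result)
  | fuel + 1, num, value, letter, result =>
    if value ≤ num then
      numHebWhileF fuel (num - value) value letter (result ++ [letter])
    else
      (num, result)

def numHebWhile (num value : Int) (letter : String) (result : List String) :
    Int × List String :=
  numHebWhileF num.toNat num value letter result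

def number_to_hebrew (num : Int) : String :=
  if num ≤ 0 ∨ num > 200 then
    ""  -- Python raises ValueError here; excluded by Pre_number_to_hebrew
  else if num = 15 then "טו"
  else if num = 16 then "טז"
  else
    let hebrew_numerals : PySem.Dict Int String := PySem.Dict.ofList
      [(1, "א"), (2, "ב"), (3, "ג"), (4, "ד"), (5, "ה"), (6, "ו"), (7, "ז"),
       (8, "ח"), (9, "ט"), (10, "י"), (20, "כ"), (30, "ל"), (40, "מ"), (50, "נ"),
       (60, "ס"), (70, "ע"), (80, "פ"), (90, "צ"), (100, "ק"), (200, "ר")]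
    let sortedItems := PySem.List.sorted hebrew_numerals.items (fun x => x.1) true
    let st := sortedItems.foldl
      (fun (st : Int × List String) vl => numHebWhile st.1 vl.1 vl.2 st.2)
      (num, [])
    PySem.Str.join "" st.2

-- ===== PORT B =====
def number_to_hebrew_alt (num : Int) : String :=
  if num ≤ 0 ∨ num > 200 then
    ""  -- Python raises ValueError here; excluded by Pre_number_to_hebrew
  else if num = 15 then "טו"
  else if num = 16 then "טז"
  else
    let hundreds : PySem.Dict Int String := PySem.Dict.ofList [(1, "ק"), (2, "ר")]
    let tens : PySem.Dict Int String := PySem.Dict.ofList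
      [(1, "י"), (2, "כ"), (3, "ל"), (4, "מ"), (5, "נ"), (6, "ס"), (7, "ע"), (8, "פ"), (9, "צ")]
    let units : PySem.Dict Int String := PySem.Dict.ofList
      [(1, "א"), (2, "ב"), (3, "ג"), (4, "ד"), (5, "ה"), (6, "ו"), (7, "ז"), (8, "ח"), (9, "ט")]
    let h := PySem.Int.floordiv num 100
    let t := PySem.Int.floordiv (PySem.Int.mod num 100) 10
    let u := PySem.Int.mod num 10
    (hundreds.getD h "") ++ (tens.getD t "") ++ (units.getD u "")

-- ===== PRECONDITION & SPEC =====
-- A raises ValueError exactly when num ≤ 0 or num > 200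
def Pre_number_to_hebrew (num : Int) : Prop := 1 ≤ num ∧ num ≤ 200
instance (num : Int) : Decidable (Pre_number_to_hebrew num) := by
  unfold Pre_number_to_hebrew; infer_instance

def pvWitness_number_to_hebrew : Int := (115)

def Spec_number_to_hebrew (num : Int) (out : String) : Prop := out = number_to_hebrew_alt num
instance (num : Int) (out : String) : Decidable (Spec_number_to_hebrew num out) := by
  unfold Spec_number_to_hebrew; infer_instance

-- ===== CLAIM (what is proved, stated in full; the proofs are below) =====
def Claim_equal_number_to_hebrew : Prop := ∀ (num : Int), Dom_number_to_hebrew num → Pre_number_to_hebrew num → Spec_number_to_hebrew num (number_to_hebrew num)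

-- ===== LEMMAS AND PROOFS =====
-- the whole (finite) admitted domain, checked by the kernel
set_option maxRecDepth 4000 in
lemma numHeb_agree : ∀ n : Nat, n < 200 →
    number_to_hebrew ((n : Int) + 1) = number_to_hebrew_alt ((n : Int) + 1) := by
  decide

-- ===== VERDICT (by name: the statement is the Claim_ definition above) =====
theorem number_to_hebrew_spec : Claim_equal_number_to_hebrew := by
  intro num _ hpre
  obtain ⟨h1, h2⟩ := hpre
  unfold Spec_number_to_hebrew
  have hn : num = ((num - 1).toNat : Int) + 1 := by omega
  have hlt : (num - 1).toNat < 200 := by omega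
  rw [hn]
  exact numHeb_agree _ hlt
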